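-- pv_equiv track=rewrite | github.com/Florian134/oewa-reporter | ci_scripts/monthly_data_utils.py | aggregate_platforms
-- ===== SOURCE A (Python) =====
-- from typing import Dict, List, Optional, Tuple
--
-- APP_PLATFORMS = ["iOS", "Android"]
--
-- def aggregate_platforms(data: Dict, aggregate_app: bool = True) -> Dict:
--     """
--     Aggregiert iOS und Android zu 'App' falls gewünscht.
--
--     Args:
--         data: Dictionary mit Plattform-Keys
--         aggregate_app: Wenn True, werden iOS+Android zu App zusammengefasst
--     """
--     if not aggregate_app:
--         return data
--
--     result = {}
--     app_data = {}
--
--     for key, metrics in data.items():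
--         brand, platform = key.rsplit("_", 1)
--
--         if platform in APP_PLATFORMS:
--             # Zu App aggregieren
--             app_key = f"{brand}_App"
--             if app_key not in app_data:
--                 app_data[app_key] = {}
--
--             for metric, value in metrics.items():
--                 if metric not in app_data[app_key]:
--                     app_data[app_key][metric] = 0
--                 app_data[app_key][metric] += value
--         else:
--             result[key] = metrics
--
--     # App-Daten hinzufügen
--     result.update(app_data)
--
--     return result
-- ===== SOURCE B (Python) =====
-- APP_PLATFORMS = ["iOS", "Android"]
--
--
-- def aggregate_platforms(data, aggregate_app=True):
--     """Re-scan variant: split every key once up front, copy the non-app entries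
--     via a comprehension, list the distinct '<brand>_App' keys in first-encounter
--     order, and build each combined entry by re-scanning the split list for that
--     group and summing its metrics."""
--     if not aggregate_app:
--         return data
--
--     split = [(k, *k.rsplit("_", 1), m) for k, m in data.items()]
--
--     result = {k: m for (k, b, p, m) in split if p not in APP_PLATFORMS}
--
--     app_keys = []
--     for (k, b, p, m) in split:
--         if p in APP_PLATFORMS and b + "_App" not in app_keys:
--             app_keys.append(b + "_App")
--
--     for ak in app_keys:
--         combined = {}
--         for (k, b, p, m) in split:
--             if p in APP_PLATFORMS and b + "_App" == ak:
--                 for metric, value in m.items():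
--                     combined[metric] = combined.get(metric, 0) + value
--         result[ak] = combined
--
--     return result
-- ===== Notes on version B (the rewrite author's own statement) =====
-- stated objective: alternative
-- what changed: A's single interleaved loop accumulating running per-metric sums into a dict-of-dicts is replaced by staged passes over a pre-split key list: a comprehension copies the non-app entries, the distinct '<brand>_App' keys are listed in first-encounter order, and each combined entry is built by re-scanning the split list for its group and summing its metrics.
import Mathlib
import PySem

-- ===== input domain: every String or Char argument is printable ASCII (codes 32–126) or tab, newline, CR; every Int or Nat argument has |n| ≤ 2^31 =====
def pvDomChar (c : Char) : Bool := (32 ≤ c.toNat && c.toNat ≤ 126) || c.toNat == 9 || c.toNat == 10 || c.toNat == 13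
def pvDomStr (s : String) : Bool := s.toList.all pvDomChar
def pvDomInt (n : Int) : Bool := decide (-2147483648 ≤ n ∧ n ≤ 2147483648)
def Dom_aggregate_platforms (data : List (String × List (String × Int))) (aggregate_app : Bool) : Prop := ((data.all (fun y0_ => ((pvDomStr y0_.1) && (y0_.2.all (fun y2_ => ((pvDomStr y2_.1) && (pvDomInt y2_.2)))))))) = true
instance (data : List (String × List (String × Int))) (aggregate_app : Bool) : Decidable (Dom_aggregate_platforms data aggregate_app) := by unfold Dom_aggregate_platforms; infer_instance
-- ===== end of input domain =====

-- B replaces A's single interleaved accumulation loop by staged passes over a pre-split key list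
-- (comprehension for non-app entries, first-encounter key list, per-group re-scan summation);
-- alternative decomposition, not faster. (Return-value equivalence; neither version mutates its argument.)

-- shared library-call helper: key.rsplit("_", 1) for a key containing '_' (none = no '_', ValueError)
def pyRsplitUnder (s : String) : Option (String × String) :=
  match (s.toList.reverse).findIdx? (fun c => c == '_') with
  | none => none
  | some j =>
      some (String.ofList (s.toList.take (s.toList.length - 1 - j)),
            String.ofList (s.toList.drop (s.toList.length - j)))

def APP_PLATFORMS : List String := ["iOS", "Android"]

-- ===== PORT A =====
-- inner loop body: 'if metric not in d: d[metric] = 0; d[metric] += value'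
def stepInnerA (d : PySem.Dict String Int) (mv : String × Int) : PySem.Dict String Int :=
  let d1 := if d.contains mv.1 then d else d.insert mv.1 0
  d1.insert mv.1 (d1.getD mv.1 0 + mv.2)

-- loop body over data.items(); on a key without '_' Python raises ValueError (excluded by Pre_)
def stepA (st : PySem.Dict String (List (String × Int)) × PySem.Dict String (PySem.Dict String Int))
    (kv : String × List (String × Int)) :
    PySem.Dict String (List (String × Int)) × PySem.Dict String (PySem.Dict String Int) :=
  match pyRsplitUnder kv.1 with
  | none => st
  | some bp =>
    if APP_PLATFORMS.contains bp.2 then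
      let app_key := bp.1 ++ "_App"
      let app_data := if st.2.contains app_key then st.2 else st.2.insert app_key PySem.Dict.empty
      (st.1, app_data.insert app_key (kv.2.foldl stepInnerA (app_data.getD app_key PySem.Dict.empty)))
    else
      (st.1.insert kv.1 kv.2, st.2)

def aggregate_platforms (data : List (String × List (String × Int))) (aggregate_app : Bool) : List (String × List (String × Int)) :=
  if aggregate_app = false then data
  else
    let st := data.foldl stepA (PySem.Dict.empty, PySem.Dict.empty)
    (st.1.update (st.2.items.map (fun p => (p.1, p.2.items)))).items

-- ===== PORT B =====
-- split = [(k, *k.rsplit("_",1), m) for k, m in data.items()]  (a key without '_' raises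
-- ValueError in Python — excluded by Pre_; the port skips such an entry)
def splitKeys (data : List (String × List (String × Int))) :
    List (String × String × String × List (String × Int)) :=
  data.filterMap (fun kv => (pyRsplitUnder kv.1).map (fun bp => (kv.1, bp.1, bp.2, kv.2)))

-- 'combined[metric] = combined.get(metric, 0) + value'
def ins1 (c : PySem.Dict String Int) (mv : String × Int) : PySem.Dict String Int :=
  c.insert mv.1 (c.getD mv.1 0 + mv.2)

-- the distinct '<brand>_App' keys in first-encounter order
def appKeysOf (split : List (String × String × String × List (String × Int))) : List String :=
  split.foldl
    (fun ks t =>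
      if APP_PLATFORMS.contains t.2.2.1 && !(ks.contains (t.2.1 ++ "_App")) then
        ks ++ [t.2.1 ++ "_App"]
      else ks) []

-- re-scan the split list for one group and sum its metrics
def combineFor (split : List (String × String × String × List (String × Int))) (ak : String) :
    PySem.Dict String Int :=
  (split.filter (fun t => APP_PLATFORMS.contains t.2.2.1 && (t.2.1 ++ "_App" == ak))).foldl
    (fun c t => t.2.2.2.foldl ins1 c) PySem.Dict.empty

def aggregate_platforms_alt (data : List (String × List (String × Int))) (aggregate_app : Bool) : List (String × List (String × Int)) :=
  if aggregate_app = false then data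
  else
    let split := splitKeys data
    let result0 : PySem.Dict String (List (String × Int)) :=
      PySem.Dict.ofList ((split.filter (fun t => !(APP_PLATFORMS.contains t.2.2.1))).map
        (fun t => (t.1, t.2.2.2)))
    ((appKeysOf split).foldl (fun r ak => r.insert ak (combineFor split ak).items) result0).items

-- ===== PRECONDITION & SPEC =====
-- Pre_ excludes association lists with duplicate outer keys or duplicate metric keys (they do not
-- represent the Python dict input), and, when aggregate_app is true, keys without '_' (A raises
-- ValueError on 'brand, platform = key.rsplit("_", 1)').
def Pre_aggregate_platforms (data : List (String × List (String × Int))) (aggregate_app : Bool) : Prop :=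
  (data.map Prod.fst).Nodup ∧
  ∀ p ∈ data, (p.2.map Prod.fst).Nodup ∧ (aggregate_app = true → '_' ∈ p.1.toList)
instance (data : List (String × List (String × Int))) (aggregate_app : Bool) : Decidable (Pre_aggregate_platforms data aggregate_app) := by unfold Pre_aggregate_platforms; infer_instance

def pvWitness_aggregate_platforms : (List (String × List (String × Int))) × Bool :=
  ([("a_iOS", [("x", 1), ("y", 2)]), ("a_Android", [("x", 3)]), ("a_Web", [("x", 2)])], true)

def Spec_aggregate_platforms (data : List (String × List (String × Int))) (aggregate_app : Bool) (out : List (String × List (String × Int))) : Prop := out = aggregate_platforms_alt data aggregate_app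
instance (data : List (String × List (String × Int))) (aggregate_app : Bool) (out : List (String × List (String × Int))) : Decidable (Spec_aggregate_platforms data aggregate_app out) := by unfold Spec_aggregate_platforms; infer_instance

-- ===== CLAIM (what is proved, stated in full; the proofs are below) =====
def Claim_equal_aggregate_platforms : Prop := ∀ (data : List (String × List (String × Int))) (aggregate_app : Bool), Dom_aggregate_platforms data aggregate_app → Pre_aggregate_platforms data aggregate_app → Spec_aggregate_platforms data aggregate_app (aggregate_platforms data aggregate_app)

-- ===== LEMMAS AND PROOFS =====

-- A's accumulation, separated per component and re-indexed over the split list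
def stepRes (r : PySem.Dict String (List (String × Int)))
    (t : String × String × String × List (String × Int)) : PySem.Dict String (List (String × Int)) :=
  if APP_PLATFORMS.contains t.2.2.1 then r else r.insert t.1 t.2.2.2

def stepApp (g : PySem.Dict String (PySem.Dict String Int))
    (t : String × String × String × List (String × Int)) : PySem.Dict String (PySem.Dict String Int) :=
  if APP_PLATFORMS.contains t.2.2.1 then
    let ak := t.2.1 ++ "_App"
    let g' := if g.contains ak then g else g.insert ak PySem.Dict.empty
    g'.insert ak (t.2.2.2.foldl stepInnerA (g'.getD ak PySem.Dict.empty))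
  else g

theorem inner_eq : stepInnerA = ins1 := by
  funext c mv
  simp only [stepInnerA, ins1]
  by_cases h : c.contains mv.1 = true
  · rw [if_pos h]
  · have h' : c.contains mv.1 = false := by simpa using h
    rw [if_neg h, PySem.Dict.getD_insert_self, PySem.Dict.insert_insert_self,
      PySem.Dict.getD_of_not_contains c 0 h']

theorem foldA_split (data : List (String × List (String × Int))) :
    ∀ r g, data.foldl stepA (r, g) =
      ((splitKeys data).foldl stepRes r, (splitKeys data).foldl stepApp g) := by
  induction data with
  | nil => intro r g; rfl
  | cons kv tl ih =>
      intro r g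
      simp only [List.foldl_cons, splitKeys, List.filterMap_cons]
      cases h : pyRsplitUnder kv.1 with
      | none => simpa [stepA, h, splitKeys] using ih r g
      | some bp =>
          simp only [Option.map_some, List.foldl_cons]
          have hstep : stepA (r, g) kv = (stepRes r (kv.1, bp.1, bp.2, kv.2), stepApp g (kv.1, bp.1, bp.2, kv.2)) := by
            simp only [stepA, stepRes, stepApp, h]
            split_ifs <;> rfl
          rw [hstep, ← splitKeys.eq_def]
          exact ih _ _

theorem res_filter (split : List (String × String × String × List (String × Int))) :
    ∀ r, split.foldl stepRes r =
      ((split.filter (fun t => !(APP_PLATFORMS.contains t.2.2.1))).map (fun t => (t.1, t.2.2.2))).foldl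
        (fun d p => d.insert p.1 p.2) r := by
  induction split with
  | nil => intro r; rfl
  | cons t tl ih =>
      intro r
      by_cases hp : t.2.2.1 ∈ APP_PLATFORMS <;>
        simp [stepRes, hp, ih]

theorem appKeysOf_eq (split : List (String × String × String × List (String × Int))) :
    appKeysOf split =
      PySem.Set.ofList ((split.filter (fun t => APP_PLATFORMS.contains t.2.2.1)).map
        (fun t => t.2.1 ++ "_App")) := by
  suffices h : ∀ ks : List String, split.foldl
      (fun ks t =>
        if APP_PLATFORMS.contains t.2.2.1 && !(ks.contains (t.2.1 ++ "_App")) then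
          ks ++ [t.2.1 ++ "_App"]
        else ks) ks =
      PySem.Set.update ks ((split.filter (fun t => APP_PLATFORMS.contains t.2.2.1)).map
        (fun t => t.2.1 ++ "_App")) by
    simpa [appKeysOf, PySem.Set.update_nil_left] using h []
  induction split with
  | nil => intro ks; simp [PySem.Set.update]
  | cons t tl ih =>
      intro ks
      by_cases hp : t.2.2.1 ∈ APP_PLATFORMS
      · have hstep : (if APP_PLATFORMS.contains t.2.2.1 && !(ks.contains (t.2.1 ++ "_App")) then
            ks ++ [t.2.1 ++ "_App"] else ks) = PySem.Set.add ks (t.2.1 ++ "_App") := by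
          rw [PySem.Set.add_eq_ite]
          by_cases hm : (t.2.1 ++ "_App") ∈ ks <;> simp [hp, hm]
        have hp' : APP_PLATFORMS.contains t.2.2.1 = true := by simpa using hp
        have hf : List.filter (fun u => APP_PLATFORMS.contains u.2.2.1) (t :: tl) =
            t :: List.filter (fun u => APP_PLATFORMS.contains u.2.2.1) tl :=
          List.filter_cons_of_pos hp'
        rw [List.foldl_cons, hstep, hf, List.map_cons, PySem.Set.update_cons]
        exact ih _
      · have hp' : APP_PLATFORMS.contains t.2.2.1 = false := by simpa using hp
        have hstep : (if APP_PLATFORMS.contains t.2.2.1 && !(ks.contains (t.2.1 ++ "_App")) then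
            ks ++ [t.2.1 ++ "_App"] else ks) = ks := by
          simp only [hp', Bool.false_and, Bool.false_eq_true, if_false]
        have hf : List.filter (fun u => APP_PLATFORMS.contains u.2.2.1) (t :: tl) =
            List.filter (fun u => APP_PLATFORMS.contains u.2.2.1) tl :=
          List.filter_cons_of_neg (by rw [hp']; exact Bool.false_ne_true)
        rw [List.foldl_cons, hstep, hf]
        exact ih _

theorem mem_appKeysOf (split : List (String × String × String × List (String × Int))) (ak : String) :
    ak ∈ appKeysOf split ↔
      ∃ t ∈ split, APP_PLATFORMS.contains t.2.2.1 = true ∧ t.2.1 ++ "_App" = ak := by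
  rw [appKeysOf_eq, PySem.Set.mem_ofList]
  constructor
  · intro h
    rcases List.mem_map.mp h with ⟨u, hu, hak⟩
    rcases List.mem_filter.mp hu with ⟨hmem, hcond⟩
    exact ⟨u, hmem, hcond, hak⟩
  · intro ⟨u, hu, hcond, hak⟩
    exact List.mem_map.mpr ⟨u, List.mem_filter.mpr ⟨hu, hcond⟩, hak⟩

theorem nodup_appKeysOf (split : List (String × String × String × List (String × Int))) :
    (appKeysOf split).Nodup := by
  rw [appKeysOf_eq]; exact PySem.Set.nodup_ofList _

theorem combineFor_nil_of_not_mem (split : List (String × String × String × List (String × Int)))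
    (ak : String) (h : ak ∉ appKeysOf split) : combineFor split ak = PySem.Dict.empty := by
  have : split.filter (fun t => APP_PLATFORMS.contains t.2.2.1 && (t.2.1 ++ "_App" == ak)) = [] := by
    rw [List.filter_eq_nil_iff]
    intro u hu hcond
    simp only [Bool.and_eq_true, beq_iff_eq] at hcond
    exact h ((mem_appKeysOf split ak).mpr ⟨u, hu, hcond.1, hcond.2⟩)
  unfold combineFor
  rw [this]
  rfl

theorem foldApp_eq (split : List (String × String × String × List (String × Int))) :
    split.foldl stepApp PySem.Dict.empty =
      PySem.Dict.mk ((appKeysOf split).map (fun ak => (ak, combineFor split ak))) := by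
  induction split using List.reverseRecOn with
  | nil => rfl
  | append_singleton s t ih =>
      have hK : ∀ u, appKeysOf (s ++ [u]) =
          (if APP_PLATFORMS.contains u.2.2.1 && !((appKeysOf s).contains (u.2.1 ++ "_App")) then
            appKeysOf s ++ [u.2.1 ++ "_App"] else appKeysOf s) := by
        intro u; simp [appKeysOf, List.foldl_append]
      have hC : ∀ ak, combineFor (s ++ [t]) ak =
          (if APP_PLATFORMS.contains t.2.2.1 && (t.2.1 ++ "_App" == ak) then
            t.2.2.2.foldl ins1 (combineFor s ak) else combineFor s ak) := by
        intro ak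
        unfold combineFor
        rw [List.filter_append, List.filter_singleton]
        by_cases hc : (APP_PLATFORMS.contains t.2.2.1 && (t.2.1 ++ "_App" == ak)) = true
        · rw [if_pos hc, hc, cond_true, List.foldl_append, List.foldl_cons, List.foldl_nil]
        · have hc' : (APP_PLATFORMS.contains t.2.2.1 && (t.2.1 ++ "_App" == ak)) = false := by
            simpa using hc
          rw [if_neg hc, hc', cond_false, List.append_nil]
      rw [List.foldl_append, List.foldl_cons, List.foldl_nil, ih]
      set K := appKeysOf s with hKdef
      set f := fun ak => (ak, combineFor s ak) with hfdef
      have hkeys : (K.map f).map Prod.fst = K := by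
        simp [hfdef, Function.comp_def]
      by_cases hp : APP_PLATFORMS.contains t.2.2.1 = true
      · -- app entry; ak := t.2.1 ++ "_App"
        set ak := t.2.1 ++ "_App" with hak
        have hpm : t.2.2.1 ∈ APP_PLATFORMS := by simpa using hp
        have hcontains : (PySem.Dict.mk (K.map f)).contains ak = decide (ak ∈ K) := by
          rw [PySem.Dict.contains_eq_decide_mem_keys]
          simp [PySem.Dict.keys, hfdef, Function.comp_def]
        have hnodupkeys : (PySem.Dict.mk (K.map f)).keys.Nodup := by
          simp only [PySem.Dict.keys]
          rw [hkeys]; exact nodup_appKeysOf s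
        by_cases hm : ak ∈ K
        · -- existing group: overwrite in place
          have hc : (PySem.Dict.mk (K.map f)).contains ak = true := by
            rw [hcontains]; simpa using hm
          have hmm : (ak, combineFor s ak) ∈ K.map f := by
            simpa [hfdef] using List.mem_map_of_mem (f := f) hm
          have hgd : (PySem.Dict.mk (K.map f)).getD ak PySem.Dict.empty = combineFor s ak :=
            PySem.Dict.getD_of_mem_items _ hmm hnodupkeys _
          have hKf : K.contains ak = true := by simpa using hm
          have hKs : appKeysOf (s ++ [t]) = K := by
            rw [hK t, ← hak, hp, hKf]; simp
          simp only [stepApp, hp, ← hak, hc, if_true, hgd]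
          apply PySem.Dict.ext
          rw [PySem.Dict.items_insert_of_contains _ _ hc, hKs]
          simp only [List.map_map]
          apply List.map_congr_left
          intro ak' hak'
          by_cases he : ak' = ak
          · subst he
            simp [Function.comp, hfdef, hC, hp, hpm, inner_eq]
          · have hne : (ak' == ak) = false := by simpa using he
            have hne2 : (ak == ak') = false := by simpa using fun h => he h.symm
            simp [Function.comp, hfdef, hC, hpm, hne, hne2]
        · -- new group: append then overwrite the appended entry
          have hc : (PySem.Dict.mk (K.map f)).contains ak = false := by
            rw [hcontains]; simpa using hm
          have hKf : K.contains ak = false := by simpa using hm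
          have hKs : appKeysOf (s ++ [t]) = K ++ [ak] := by
            rw [hK t, ← hak, hp, hKf]; simp
          have hitems1 : ((PySem.Dict.mk (K.map f)).insert ak PySem.Dict.empty).items =
              K.map f ++ [(ak, PySem.Dict.empty)] :=
            PySem.Dict.items_insert_of_not_contains _ _ hc
          have hnodup2 : ((PySem.Dict.mk (K.map f)).insert ak PySem.Dict.empty).keys.Nodup := by
            simp only [PySem.Dict.keys, hitems1, List.map_append, hkeys]
            exact List.Nodup.append (nodup_appKeysOf s) (List.nodup_singleton _) (by simpa using hm)
          have hgd : ((PySem.Dict.mk (K.map f)).insert ak PySem.Dict.empty).getD ak PySem.Dict.empty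
              = PySem.Dict.empty := by
            apply PySem.Dict.getD_of_mem_items _ ?_ hnodup2
            rw [hitems1]; simp
          have hc2 : ((PySem.Dict.mk (K.map f)).insert ak PySem.Dict.empty).contains ak = true :=
            PySem.Dict.contains_insert_self _ _ _
          simp only [stepApp, hp, ← hak, hc, if_true, Bool.false_eq_true, if_false, hgd]
          apply PySem.Dict.ext
          rw [PySem.Dict.items_insert_of_contains _ _ hc2, hitems1, hKs]
          simp only [List.map_append, List.map_map]
          congr 1
          · apply List.map_congr_left
            intro ak' hak'
            have he : ak' ≠ ak := fun h => hm (h ▸ hak')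
            have hne : (ak' == ak) = false := by simpa using he
            have hne2 : (ak == ak') = false := by simpa using fun h => he h.symm
            simp [Function.comp, hfdef, hC, hpm, hne, hne2]
          · have hcomb : combineFor (s ++ [t]) ak = t.2.2.2.foldl ins1 PySem.Dict.empty := by
              rw [hC ak, if_pos (by simp [hpm]), combineFor_nil_of_not_mem s ak (by simpa [hKdef] using hm)]
            simp [hcomb, inner_eq]
      · -- non-app entry: everything unchanged
        have hp' : APP_PLATFORMS.contains t.2.2.1 = false := by simpa using hp
        have hpm' : t.2.2.1 ∉ APP_PLATFORMS := by simpa using hp'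
        have hKs : appKeysOf (s ++ [t]) = K := by
          rw [hK t, hp']; simp
        simp only [stepApp, hp', Bool.false_eq_true, if_false, hKs]
        apply PySem.Dict.ext
        apply List.map_congr_left
        intro ak' _
        simp [hfdef, hC, hpm']

theorem main_eq (data : List (String × List (String × Int))) (aggregate_app : Bool) :
    aggregate_platforms data aggregate_app = aggregate_platforms_alt data aggregate_app := by
  unfold aggregate_platforms aggregate_platforms_alt
  cases aggregate_app with
  | false => rfl
  | true =>
      simp only [Bool.true_eq_false, if_false]
      rw [foldA_split, foldApp_eq]
      have hres : (splitKeys data).foldl stepRes PySem.Dict.empty =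
          PySem.Dict.ofList (((splitKeys data).filter
            (fun t => !(APP_PLATFORMS.contains t.2.2.1))).map (fun t => (t.1, t.2.2.2))) := by
        rw [res_filter]; rfl
      rw [hres]
      congr 1
      simp only [PySem.Dict.update, List.map_map, List.foldl_map]
      rfl

-- ===== VERDICT (by name: the statement is the Claim_ definition above) =====
theorem aggregate_platforms_spec : Claim_equal_aggregate_platforms := by
  intro data aggregate_app _ _
  unfold Spec_aggregate_platforms
  exact main_eq data aggregate_app
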